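-- pv_equiv track=rewrite | github.com/mjrousos/AdventOfCode | 2023/day1/part2.py | getLineValue
-- ===== SOURCE A (Python) =====
-- numberMap = {
--     "one": 1,
--     "two": 2,
--     "three": 3,
--     "four": 4,
--     "five": 5,
--     "six": 6,
--     "seven": 7,
--     "eight" : 8,
--     "nine": 9
-- }
--
-- def getValueAtIndex(line, index):
--     if line[index].isnumeric():
--         return int(line[index])
--     else:
--         for key in numberMap:
--             if line[index:index + len(key)] == key:
--                 return numberMap[key]
--     return None
--
-- def getLineValue(line):
--     # Find the first digit
--     i = 0
--     while not getValueAtIndex(line, i):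
--         i += 1
--     first = getValueAtIndex(line, i)
--
--     # Find the last digit
--     i = len(line) - 1
--     while not getValueAtIndex(line, i):
--         i -= 1
--     last = getValueAtIndex(line, i)
--
--     return first * 10 + last
-- ===== SOURCE B (Python) =====
-- numberMap = {
--     "one": 1,
--     "two": 2,
--     "three": 3,
--     "four": 4,
--     "five": 5,
--     "six": 6,
--     "seven": 7,
--     "eight" : 8,
--     "nine": 9
-- }
--
-- def getLineValue(line):
--     # one forward pass: collect every truthy digit/word value in order,
--     # then combine the first and last of the collected list
--     values = []
--     for i in range(len(line)):
--         c = line[i]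
--         if c.isnumeric():
--             v = int(c)
--         else:
--             v = None
--             for key, num in numberMap.items():
--                 if line[i:i + len(key)] == key:
--                     v = num
--                     break
--         if v:
--             values.append(v)
--     return values[0] * 10 + values[-1]
-- ===== Notes on version B (the rewrite author's own statement) =====
-- stated objective: alternative
-- what changed: Replaces A's two directional while-loops (forward sentinel scan for the first match, backward scan with possible negative-index wraparound for the last) by a single forward pass that collects every truthy digit/word value into a list and returns values[0]*10 + values[-1].
import Mathlib
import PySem

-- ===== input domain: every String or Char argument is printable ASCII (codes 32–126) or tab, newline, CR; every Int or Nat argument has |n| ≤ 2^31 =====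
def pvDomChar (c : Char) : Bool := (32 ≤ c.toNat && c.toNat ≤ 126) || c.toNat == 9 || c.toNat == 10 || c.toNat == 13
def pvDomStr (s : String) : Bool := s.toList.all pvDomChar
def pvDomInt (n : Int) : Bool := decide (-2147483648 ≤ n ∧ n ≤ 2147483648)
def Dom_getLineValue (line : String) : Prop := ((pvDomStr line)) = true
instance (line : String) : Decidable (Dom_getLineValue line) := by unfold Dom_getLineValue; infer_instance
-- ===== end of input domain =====

-- B is an alternative decomposition: one forward pass collecting all matches instead of
-- A's two directional sentinel while-loops; return value only is compared.

-- ===== PORT A =====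
-- numberMap, in insertion order
def nmap : List (List Char × Int) :=
  [("one".toList, 1), ("two".toList, 2), ("three".toList, 3), ("four".toList, 4),
   ("five".toList, 5), ("six".toList, 6), ("seven".toList, 7), ("eight".toList, 8),
   ("nine".toList, 9)]

-- getValueAtIndex: digit branch, else first numberMap key matching at index, else None
def valAt (l : List Char) (i : Int) : Option Int :=
  match PySem.List.pyGet? l i with
  | none => none            -- line[index] raises here; excluded by Pre_
  | some c =>
    if '0' ≤ c ∧ c ≤ '9' then some ((c.toNat : Int) - 48)
    else (nmap.find? (fun kv => PySem.List.slice l (some i) (some (i + (kv.1.length : Int))) == kv.1)).map Prod.snd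

-- Python truthiness of getValueAtIndex's result (None and 0 are falsy)
def truthy (l : List Char) (i : Int) : Bool :=
  match valAt l i with
  | none => false
  | some v => !(v == 0)

-- 'while not getValueAtIndex(line, i): i += 1' — fuel bounds the scan; fuel only
-- runs out on inputs where Python raises IndexError (excluded by Pre_)
def loopF (l : List Char) : Nat → Int → Option Int
  | 0, _ => none
  | fuel + 1, i => if truthy l i then some i else loopF l fuel (i + 1)

-- 'while not getValueAtIndex(line, i): i -= 1' (index may go negative and wrap, as in Python)
def loopB (l : List Char) : Nat → Int → Option Int
  | 0, _ => none
  | fuel + 1, i => if truthy l i then some i else loopB l fuel (i - 1)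

def getLineValue (line : String) : Int :=
  let l := line.toList
  match loopF l (l.length + 1) 0 with
  | none => 0               -- Python raised IndexError; excluded by Pre_
  | some i =>
    let first := (valAt l i).getD 0
    match loopB l (2 * l.length + 2) ((l.length : Int) - 1) with
    | none => 0             -- Python raised IndexError; excluded by Pre_
    | some j => first * 10 + (valAt l j).getD 0

-- ===== PORT B =====
-- one pass over range(len(line)): keep each truthy value, in order
def valsOf (l : List Char) : List Int :=
  (List.range l.length).filterMap (fun k : Nat =>
    match valAt l (k : Int) with
    | some v => if v ≠ 0 then some v else none
    | none => none)

def getLineValue_alt (line : String) : Int :=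
  let vs := valsOf line.toList
  vs.headD 0 * 10 + vs.getLastD 0   -- values[0] / values[-1]; empty vs raises in Python (excluded by Pre_)

-- ===== PRECONDITION & SPEC =====
def pvWords : List String :=
  ["one", "two", "three", "four", "five", "six", "seven", "eight", "nine"]

-- Pre_ excludes exactly the lines with no nonzero digit and no spelled number word:
-- there both Pythons raise IndexError (A's scans run off the ends, B indexes an empty list).
def Pre_getLineValue (line : String) : Prop :=
  (line.toList.any (fun c => 49 ≤ c.toNat && c.toNat ≤ 57)) = true ∨
    (∃ w ∈ pvWords, w.toList <:+: line.toList)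
instance (line : String) : Decidable (Pre_getLineValue line) := by
  unfold Pre_getLineValue; infer_instance

def pvWitness_getLineValue : String := "xtwone3x"

def Spec_getLineValue (line : String) (out : Int) : Prop := out = getLineValue_alt line
instance (line : String) (out : Int) : Decidable (Spec_getLineValue line out) := by
  unfold Spec_getLineValue; infer_instance

-- ===== CLAIM (what is proved, stated in full; the proofs are below) =====
def Claim_equal_getLineValue : Prop :=
  ∀ (line : String), Dom_getLineValue line → Pre_getLineValue line →
    Spec_getLineValue line (getLineValue line)

-- ===== LEMMAS AND PROOFS =====

-- every value in numberMap is nonzero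
theorem nmap_snd_ne_zero : ∀ kv ∈ nmap, kv.2 ≠ 0 := by decide

-- beyond the end of the line nothing is truthy
theorem truthy_false_of_ge (l : List Char) (k : Nat) (hk : l.length ≤ k) :
    truthy l (k : Int) = false := by
  unfold truthy valAt
  rw [PySem.List.pyGet?_natCast]
  rw [List.getElem?_eq_none hk]

-- a number word sitting at position s.length makes that index truthy
theorem truthy_of_word_at (s t cs : List Char) (c : Char)
    (hc : ¬('0' ≤ c ∧ c ≤ '9')) (hmem : ∃ kv ∈ nmap, kv.1 = c :: cs) :
    truthy (s ++ (c :: cs) ++ t) (s.length : Int) = true := by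
  obtain ⟨kv, hkv, hfst⟩ := hmem
  have hl : s ++ (c :: cs) ++ t = s ++ c :: (cs ++ t) := by simp
  have hget : PySem.List.pyGet? (s ++ (c :: cs) ++ t) (s.length : Int) = some c := by
    rw [hl]; exact PySem.List.pyGet?_append_length s (cs ++ t) c
  have hpred : (fun kv : List Char × Int =>
      PySem.List.slice (s ++ (c :: cs) ++ t) (some (s.length : Int))
        (some ((s.length : Int) + (kv.1.length : Int))) == kv.1) kv = true := by
    simp only [hfst]
    rw [PySem.List.slice_natCast_add]
    have hdrop : (s ++ (c :: cs) ++ t).drop s.length = (c :: cs) ++ t := by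
      rw [hl, List.drop_left]
      simp
    rw [hdrop, List.take_left]
    exact beq_self_eq_true _
  have hsome : (nmap.find? (fun kv : List Char × Int =>
      PySem.List.slice (s ++ (c :: cs) ++ t) (some (s.length : Int))
        (some ((s.length : Int) + (kv.1.length : Int))) == kv.1)).isSome := by
    rw [List.find?_isSome]
    exact ⟨kv, hkv, hpred⟩
  obtain ⟨kv', hfind⟩ := Option.isSome_iff_exists.mp hsome
  have hmem' : kv' ∈ nmap := List.mem_of_find?_eq_some hfind
  unfold truthy valAt
  rw [hget]
  simp only [hc, if_false, hfind, Option.map_some]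
  simpa using nmap_snd_ne_zero kv' hmem'

-- Pre_ produces a truthy index
theorem pre_truthy (line : String) (h : Pre_getLineValue line) :
    ∃ k < line.toList.length, truthy line.toList (k : Int) = true := by
  rcases h with hdig | ⟨w, hw, hinf⟩
  · obtain ⟨c, hc, hb⟩ := List.any_eq_true.mp hdig
    obtain ⟨h1, h9⟩ : 49 ≤ c.toNat ∧ c.toNat ≤ 57 := by simpa using hb
    obtain ⟨k, hk, hget⟩ := List.mem_iff_getElem.mp hc
    refine ⟨k, hk, ?_⟩
    unfold truthy valAt
    rw [PySem.List.pyGet?_natCast, List.getElem?_eq_getElem hk, hget]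
    have hc09 : '0' ≤ c ∧ c ≤ '9' := by
      have hc' : 49 ≤ c.val.toNat ∧ c.val.toNat ≤ 57 := ⟨h1, h9⟩
      constructor
      · rw [Char.le_def, UInt32.le_iff_toNat_le, show '0'.val.toNat = 48 from rfl]; omega
      · rw [Char.le_def, UInt32.le_iff_toNat_le, show '9'.val.toNat = 57 from rfl]; omega
    simp only [hc09]
    have : (c.toNat : Int) - 48 ≠ 0 := by omega
    simpa using this
  · obtain ⟨s, t, hst⟩ := hinf
    have hlen : s.length < line.toList.length := by
      have hwne : w.toList ≠ [] := by
        fin_cases hw <;> decide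
      rw [← hst]
      rcases List.exists_cons_of_ne_nil hwne with ⟨c, cs, hcons⟩
      simp [hcons]
    refine ⟨s.length, hlen, ?_⟩
    rw [← hst]
    fin_cases hw
    · exact truthy_of_word_at s t _ 'o' (by decide) (by decide)
    · exact truthy_of_word_at s t _ 't' (by decide) (by decide)
    · exact truthy_of_word_at s t _ 't' (by decide) (by decide)
    · exact truthy_of_word_at s t _ 'f' (by decide) (by decide)
    · exact truthy_of_word_at s t _ 'f' (by decide) (by decide)
    · exact truthy_of_word_at s t _ 's' (by decide) (by decide)
    · exact truthy_of_word_at s t _ 's' (by decide) (by decide)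
    · exact truthy_of_word_at s t _ 'e' (by decide) (by decide)
    · exact truthy_of_word_at s t _ 'n' (by decide) (by decide)

-- B's list is the truthy indices mapped to their values
theorem pv_filterMap_eq_map_filter {α β : Type} (F : α → Option β) (p : α → Bool) (g : α → β)
    (hpt : ∀ k, F k = if p k then some (g k) else none) :
    ∀ xs : List α, xs.filterMap F = (xs.filter p).map g := by
  intro xs
  induction xs with
  | nil => rfl
  | cons k ks ih =>
    rw [List.filterMap_cons, hpt k, List.filter_cons]
    cases hp : p k <;> simp [ih]

theorem valsOf_eq (l : List Char) :
    valsOf l = ((List.range l.length).filter (fun k : Nat => truthy l (k : Int))).map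
      (fun k : Nat => (valAt l (k : Int)).getD 0) := by
  unfold valsOf
  apply pv_filterMap_eq_map_filter
  intro k
  unfold truthy
  cases hv : valAt l (k : Int) with
  | none => rfl
  | some v =>
    by_cases hz : v = 0
    · simp [hz]
    · simp [hz]

-- A's forward loop finds the head of the truthy indices ≥ i
theorem loopF_spec (l : List Char) (fuel i : Nat) (hf : l.length + 1 - i ≤ fuel) :
    loopF l fuel (i : Int) =
      (((List.range' i (l.length - i)).filter (fun k : Nat => truthy l (k : Int))).head?).map
        (fun k : Nat => (k : Int)) := by
  induction fuel generalizing i with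
  | zero =>
    have h0 : l.length - i = 0 := by omega
    rw [h0]
    rfl
  | succ fuel ih =>
    by_cases hi : i < l.length
    · have hr : List.range' i (l.length - i) = i :: List.range' (i + 1) (l.length - (i + 1)) := by
        have : l.length - i = (l.length - (i + 1)) + 1 := by omega
        rw [this, List.range'_succ]
      rw [hr, List.filter_cons]
      by_cases ht : truthy l (i : Int) = true
      · simp [loopF, ht]
      · have ht' : truthy l (i : Int) = false := by
          cases h : truthy l (i : Int)
          · rfl
          · exact absurd h ht
        simp only [loopF, ht', Bool.false_eq_true, if_false]
        rw [show (i : Int) + 1 = ((i + 1 : Nat) : Int) by push_cast; ring]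
        exact ih (i + 1) (by omega)
    · have hz : l.length - i = 0 := by omega
      have ht' : truthy l (i : Int) = false := truthy_false_of_ge l i (by omega)
      rw [hz]
      simp only [loopF, ht', Bool.false_eq_true, if_false]
      rw [show (i : Int) + 1 = ((i + 1 : Nat) : Int) by push_cast; ring]
      rw [ih (i + 1) (by omega), show l.length - (i + 1) = 0 from by omega]
      rfl

-- A's backward loop finds the last truthy index ≤ i
theorem loopB_spec (l : List Char) (fuel i : Nat) (hf : i + 1 ≤ fuel)
    (hne : ((List.range (i + 1)).filter (fun k : Nat => truthy l (k : Int))) ≠ []) :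
    loopB l fuel (i : Int) =
      (((List.range (i + 1)).filter (fun k : Nat => truthy l (k : Int))).getLast?).map
        (fun k : Nat => (k : Int)) := by
  induction i generalizing fuel with
  | zero =>
    have ht : truthy l (0 : Int) = true := by
      by_contra h
      have h' : truthy l (0 : Int) = false := by
        cases hb : truthy l (0 : Int)
        · rfl
        · exact absurd hb h
      exact hne (by simp [List.range_succ, h'])
    cases fuel with
    | zero => omega
    | succ fuel =>
      simp [loopB, List.range_succ, ht]
  | succ j ih =>
    cases fuel with
    | zero => omega
    | succ fuel =>
      have hsplit : List.range (j + 1 + 1) = List.range (j + 1) ++ [j + 1] := List.range_succ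
      by_cases ht : truthy l ((j + 1 : Nat) : Int) = true
      · have ht2 : truthy l ((j : Int) + 1) = true := by simpa using ht
        rw [hsplit, List.filter_append]
        rw [List.filter_cons_of_pos (by simpa using ht)]
        simp [loopB, ht2]
      · have ht' : truthy l ((j + 1 : Nat) : Int) = false := by
          cases h : truthy l ((j + 1 : Nat) : Int)
          · rfl
          · exact absurd h ht
        have ht'2 : truthy l ((j : Int) + 1) = false := by
          rw [show (j : Int) + 1 = ((j + 1 : Nat) : Int) by push_cast; ring]
          exact ht'
        have hfilter : (List.range (j + 1 + 1)).filter (fun k : Nat => truthy l (k : Int)) =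
            (List.range (j + 1)).filter (fun k : Nat => truthy l (k : Int)) := by
          rw [hsplit, List.filter_append, List.filter_cons_of_neg (by simp [ht'2])]
          simp
        simp only [loopB, ht'2, Nat.cast_add, Nat.cast_one, Bool.false_eq_true, if_false]
        rw [show (j : Int) + 1 - 1 = (j : Int) by ring]
        rw [hfilter]
        exact ih fuel (by omega) (by rw [← hfilter]; exact hne)

-- ===== VERDICT (by name: the statement is the Claim_ definition above) =====
theorem getLineValue_spec : Claim_equal_getLineValue := by
  intro line _hdom hpre
  unfold Spec_getLineValue
  obtain ⟨k0, hk0, ht0⟩ := pre_truthy line hpre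
  have hSne : (List.range line.toList.length).filter
      (fun k : Nat => truthy line.toList (k : Int)) ≠ [] := by
    intro hempty
    have hmem : k0 ∈ (List.range line.toList.length).filter
        (fun k : Nat => truthy line.toList (k : Int)) :=
      List.mem_filter.mpr ⟨List.mem_range.mpr hk0, ht0⟩
    rw [hempty] at hmem
    exact absurd hmem (List.not_mem_nil)
  set S := (List.range line.toList.length).filter
    (fun k : Nat => truthy line.toList (k : Int)) with hS
  have hn1 : 1 ≤ line.toList.length := by omega
  have hF : loopF line.toList (line.toList.length + 1) (0 : Int) =
      S.head?.map (fun k : Nat => (k : Int)) := by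
    have h := loopF_spec line.toList (line.toList.length + 1) 0 (by omega)
    simpa [hS, List.range_eq_range'] using h
  have hB : loopB line.toList (2 * line.toList.length + 2)
      (((line.toList.length - 1 : Nat)) : Int) = S.getLast?.map (fun k : Nat => (k : Int)) := by
    have h := loopB_spec line.toList (2 * line.toList.length + 2) (line.toList.length - 1)
      (by omega)
      (by rw [show line.toList.length - 1 + 1 = line.toList.length from by omega]; exact hSne)
    rw [show line.toList.length - 1 + 1 = line.toList.length from by omega] at h
    exact h
  have hhead : S.head? = some (S.head hSne) := List.head?_eq_some_head hSne
  have hlast : S.getLast? = some (S.getLast hSne) := List.getLast?_eq_some_getLast hSne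
  simp only [getLineValue, getLineValue_alt]
  rw [hF, hhead]
  rw [show ((line.toList.length : Int) - 1) = (((line.toList.length - 1 : Nat)) : Int) by omega]
  rw [hB, hlast]
  simp only [Option.map_some]
  rw [valsOf_eq, ← hS]
  rw [List.headD_eq_head?_getD, List.head?_map, hhead]
  rw [List.getLastD_eq_getLast?, List.getLast?_map, hlast]
  rfl
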